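-- pv_equiv track=rewrite | github.com/raghadjam/AppliedCryptography | task1.py | recover_keystream
-- ===== SOURCE A (Python) =====
-- def strxor(a, b):
--     return bytearray([x ^ y for x, y in zip(a, b)])
--
-- def recover_keystream(ciphertexts):
--     max_len = max(len(c) for c in ciphertexts)
--     key = [None] * max_len
--     space_hits = [ [0]*max_len for _ in range(len(ciphertexts)) ]
--     for i in range(len(ciphertexts)):
--         for j in range(len(ciphertexts)):
--             if i == j:
--                 continue
--             c1 = ciphertexts[i]
--             c2 = ciphertexts[j]
--             xor = strxor(c1, c2)
--             for k in range(len(xor)):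
--                 if (65 <= xor[k] <= 90) or (97 <= xor[k] <= 122):
--                     space_hits[i][k] += 1
--     for i, hits in enumerate(space_hits):
--         c = ciphertexts[i]
--         for j, count in enumerate(hits):
--             if count >= 7 and j < len(c):
--                 key[j] = c[j] ^ 0x20
--     return key
-- ===== SOURCE B (Python) =====
-- def recover_keystream(ciphertexts):
--     max_len = max((len(c) for c in ciphertexts), default=0)
--     key = []
--     for k in range(max_len):
--         col = [c[k] for c in ciphertexts if k < len(c)]
--         cnt = {}
--         for b in col:
--             cnt[b] = cnt.get(b, 0) + 1
--         best = None
--         for b in col: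
--             hits = 0
--             for v, m in cnt.items():
--                 x = b ^ v
--                 if 65 <= x <= 90 or 97 <= x <= 122:
--                     hits += m
--             if hits >= 7:
--                 best = b ^ 0x20
--         key.append(best)
--     return key
-- ===== Notes on version B (the rewrite author's own statement) =====
-- stated objective: faster
-- what changed: Replaces the all-pairs row scan with a column-major pass: per column build a byte histogram (dict) once and count letter-producing partners of each byte from the histogram, writing each key position once (last qualifying row wins) instead of maintaining an n-by-L space_hits matrix.
import Mathlib
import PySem

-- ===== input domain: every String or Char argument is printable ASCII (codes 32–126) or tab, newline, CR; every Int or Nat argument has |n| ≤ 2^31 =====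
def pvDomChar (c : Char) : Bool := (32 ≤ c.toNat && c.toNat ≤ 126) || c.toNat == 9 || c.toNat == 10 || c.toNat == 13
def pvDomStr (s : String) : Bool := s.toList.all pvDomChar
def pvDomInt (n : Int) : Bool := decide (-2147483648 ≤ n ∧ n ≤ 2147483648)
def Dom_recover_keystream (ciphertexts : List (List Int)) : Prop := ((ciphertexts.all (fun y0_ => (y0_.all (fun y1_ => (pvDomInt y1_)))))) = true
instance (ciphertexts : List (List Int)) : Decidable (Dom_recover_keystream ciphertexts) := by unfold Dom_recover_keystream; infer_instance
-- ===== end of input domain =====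

-- B replaces the all-pairs row scan with a column-major pass using a per-column byte histogram
-- (measurably faster in a timing run; equivalence of RETURN values proved below).

-- the letter test '65 <= x <= 90 or 97 <= x <= 122' both Pythons perform
def pvLetter (x : Int) : Bool := (decide (65 ≤ x) && decide (x ≤ 90)) || (decide (97 ≤ x) && decide (x ≤ 122))

-- ===== PORT A =====
def recover_keystream (ciphertexts : List (List Int)) : List (Option Int) :=
  let max_len : Nat := (PySem.List.max? (ciphertexts.map (fun c => c.length)) id).getD 0
  let key : List (Option Int) := List.replicate max_len none
  let space_hits : List (List Int) :=
    List.replicate ciphertexts.length (List.replicate max_len 0)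
  let space_hits := (List.range ciphertexts.length).foldl (fun sh i =>
    (List.range ciphertexts.length).foldl (fun sh j =>
      if i = j then sh
      else
        let c1 := ciphertexts.getD i []
        let c2 := ciphertexts.getD j []
        let xor := List.zipWith PySem.Int.bxor c1 c2   -- strxor (bytearray; in range inside Pre_)
        (List.range xor.length).foldl (fun sh k =>
          if pvLetter (xor.getD k 0) then sh.modify i (fun row => row.modify k (· + 1)) else sh)
          sh) sh) space_hits
  space_hits.zipIdx.foldl (fun key rowi =>
    let c := ciphertexts.getD rowi.2 []
    rowi.1.zipIdx.foldl (fun key cntj =>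
      if 7 ≤ cntj.1 ∧ cntj.2 < c.length then
        key.set cntj.2 (some (PySem.Int.bxor (c.getD cntj.2 0) 32))
      else key) key) key

-- ===== PORT B =====
def recover_keystream_alt (ciphertexts : List (List Int)) : List (Option Int) :=
  let max_len : Nat := (PySem.List.max? (ciphertexts.map (fun c => c.length)) id).getD 0
  (List.range max_len).foldl (fun key k =>
    let col := (ciphertexts.filter (fun c => decide (k < c.length))).map (fun c => c.getD k 0)
    let cnt := col.foldl (fun d b => d.insert b (d.getD b 0 + 1)) (PySem.Dict.empty : PySem.Dict Int Int)
    let best := col.foldl (fun best b =>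
      let hits := cnt.items.foldl (fun s vm =>
        if pvLetter (PySem.Int.bxor b vm.1) then s + vm.2 else s) (0 : Int)
      if 7 ≤ hits then some (PySem.Int.bxor b 32) else best) none
    key ++ [best]) []

-- ===== PRECONDITION & SPEC =====
-- Pre_ excludes exactly the inputs where Python A raises ValueError: the empty list (max() of an
-- empty generator) and inputs where some pairwise xor falls outside 0..255 (bytearray rejects it).
def Pre_recover_keystream (ciphertexts : List (List Int)) : Prop :=
  ciphertexts ≠ [] ∧
    ∀ c1 ∈ ciphertexts, ∀ c2 ∈ ciphertexts,
      ∀ x ∈ List.zipWith PySem.Int.bxor c1 c2, 0 ≤ x ∧ x < 256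
instance (ciphertexts : List (List Int)) : Decidable (Pre_recover_keystream ciphertexts) := by
  unfold Pre_recover_keystream; infer_instance
def pvWitness_recover_keystream : List (List Int) := [[65, 2], [3]]

def Spec_recover_keystream (ciphertexts : List (List Int)) (out : List (Option Int)) : Prop :=
  out = recover_keystream_alt ciphertexts
instance (ciphertexts : List (List Int)) (out : List (Option Int)) :
    Decidable (Spec_recover_keystream ciphertexts out) := by
  unfold Spec_recover_keystream; infer_instance

-- ===== CLAIM (what is proved, stated in full; the proofs are below) =====
def Claim_equal_recover_keystream : Prop :=
  ∀ (ciphertexts : List (List Int)), Dom_recover_keystream ciphertexts →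
    Pre_recover_keystream ciphertexts →
      Spec_recover_keystream ciphertexts (recover_keystream ciphertexts)

-- ===== LEMMAS AND PROOFS =====

-- generic facts about folds of modify/set at fixed or distinct indices

theorem pv_getD_modify {α : Type} (l : List α) (i j : Nat) (f : α → α) (d : α) :
    (l.modify i f).getD j d = if i = j ∧ j < l.length then f (l.getD j d) else l.getD j d := by
  by_cases hj : j < l.length
  · simp only [List.getD_eq_getElem?_getD, List.getElem?_modify]
    rw [List.getElem?_eq_getElem hj]
    by_cases hij : i = j <;> simp [hij, hj]
  · have h1 : l[j]? = none := List.getElem?_eq_none (by omega)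
    simp only [List.getD_eq_getElem?_getD, List.getElem?_modify, h1]
    simp [hj]

theorem pv_modify_id {α : Type} (l : List α) (i : Nat) : l.modify i (fun x => x) = l := by
  apply List.ext_getElem (by simp)
  intro j h1 h2; simp [List.getElem_modify]

theorem pv_modify_modify {α : Type} (l : List α) (i : Nat) (f g : α → α) :
    (l.modify i f).modify i g = l.modify i (fun x => g (f x)) := by
  apply List.ext_getElem (by simp)
  intro j h1 h2; simp [List.getElem_modify]; split <;> rfl

theorem pv_foldl_modify_lift {α β : Type} (l : List β) (s : List α) (i : Nat) (g : β → α → α) :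
    l.foldl (fun s x => s.modify i (g x)) s = s.modify i (fun r => l.foldl (fun r x => g x r) r) := by
  induction l generalizing s with
  | nil => simp [pv_modify_id]
  | cons x l ih => simp only [List.foldl_cons]; rw [ih, pv_modify_modify]

theorem pv_length_foldl {α β : Type} (l : List β) (s : List α) (step : List α → β → List α)
    (h : ∀ s x, (step s x).length = s.length) : (l.foldl step s).length = s.length := by
  induction l generalizing s with
  | nil => rfl
  | cons x l ih => rw [List.foldl_cons, ih, h]

theorem pv_getD_foldl_range_modify {α : Type} (n : Nat) (F : Nat → α → α) (s : List α) (i : Nat) (d : α) :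
    ((List.range n).foldl (fun s j => s.modify j (F j)) s).getD i d
      = if i < n ∧ i < s.length then F i (s.getD i d) else s.getD i d := by
  induction n with
  | zero => simp
  | succ n ih =>
    rw [List.range_succ, List.foldl_append]
    simp only [List.foldl_cons, List.foldl_nil]
    rw [pv_getD_modify, ih]
    have hl : ((List.range n).foldl (fun s j => s.modify j (F j)) s).length = s.length :=
      pv_length_foldl _ _ _ (by intro s x; simp)
    rw [hl]
    by_cases hi : i < s.length
    · by_cases hin : i < n
      · have : ¬ (n = i) := by omega
        simp [hi, hin, this]; intro h; omega
      · by_cases hni : n = i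
        · subst hni; simp [hi]
        · have h2 : ¬ (i < n + 1) := by omega
          simp [hni, h2, hi]
          intro h; exact absurd h hin
    · simp [hi]

theorem pv_getD_set {α : Type} (l : List α) (i j : Nat) (a d : α) :
    (l.set i a).getD j d = if i = j ∧ j < l.length then a else l.getD j d := by
  simp only [List.getD_eq_getElem?_getD, List.getElem?_set]
  by_cases hij : i = j
  · subst hij
    by_cases hi : i < l.length
    · simp [hi]
    · simp [hi]
  · simp [hij]

theorem pv_getD_foldl_update {α β : Type} (l : List β) (key : List α) (d : α) (k L : Nat)
    (step : List α → β → List α) (upd : β → α → α)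
    (hlen : ∀ key b, (step key b).length = key.length)
    (heff : ∀ (key : List α) b, key.length = L → (step key b).getD k d = upd b (key.getD k d))
    (hkey : key.length = L) :
    (l.foldl step key).getD k d = l.foldl (fun x b => upd b x) (key.getD k d) := by
  induction l generalizing key with
  | nil => rfl
  | cons b l ih =>
    rw [List.foldl_cons, List.foldl_cons, ih (step key b) (by rw [hlen, hkey]), heff key b hkey]

theorem pv_range_map_getD {α : Type} (l : List α) (d : α) :
    (List.range l.length).map (fun i => l.getD i d) = l := by
  apply List.ext_getElem (by simp)
  intro j h1 h2
  simp [List.getD_eq_getElem?_getD, List.getElem?_eq_getElem h2]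

theorem pv_zipIdx_eq_map {α : Type} (l : List α) (d : α) :
    l.zipIdx = (List.range l.length).map (fun i => (l.getD i d, i)) := by
  apply List.ext_getElem (by simp)
  intro j h1 h2
  simp [List.getElem_zipIdx, List.getD_eq_getElem?_getD, List.getElem?_eq_getElem (by simpa using h1)]

theorem pv_foldl_filter_map {α β γ : Type} (l : List α) (p : α → Bool) (h : α → β)
    (g : γ → β → γ) (a : γ) :
    l.foldl (fun acc c => if p c then g acc (h c) else acc) a
      = ((l.filter p).map h).foldl g a := by
  induction l generalizing a with
  | nil => rfl
  | cons c l ih =>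
    by_cases hp : p c <;> simp [hp, ih]

def pvCol (cts : List (List Int)) (k : Nat) : List Int :=
  (cts.filter (fun c => decide (k < c.length))).map (fun c => c.getD k 0)
def pvHits (cts : List (List Int)) (k : Nat) (b : Int) : Int :=
  ((pvCol cts k).countP (fun v => pvLetter (PySem.Int.bxor b v)) : Int)
def pvBest (cts : List (List Int)) (k : Nat) : Option Int :=
  (pvCol cts k).foldl (fun best b =>
    if 7 ≤ pvHits cts k b then some (PySem.Int.bxor b 32) else best) none
def pvLen (cts : List (List Int)) : Nat :=
  (PySem.List.max? (cts.map (fun c => c.length)) id).getD 0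

-- proof-side names for A's intermediate state
def pvXor (cts : List (List Int)) (i j : Nat) : List Int :=
  List.zipWith PySem.Int.bxor (cts.getD i []) (cts.getD j [])
def pvRowStep (cts : List (List Int)) (i j : Nat) (row : List Int) : List Int :=
  if i = j then row else
    (List.range (pvXor cts i j).length).foldl
      (fun row k => if pvLetter ((pvXor cts i j).getD k 0) then row.modify k (· + 1) else row) row
def pvRow (cts : List (List Int)) (i : Nat) : List Int :=
  (List.range cts.length).foldl (fun row j => pvRowStep cts i j row)
    (List.replicate (pvLen cts) 0)
def pvSh (cts : List (List Int)) : List (List Int) :=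
  (List.range cts.length).foldl (fun sh i =>
    (List.range cts.length).foldl (fun sh j =>
      if i = j then sh
      else
        (List.range (pvXor cts i j).length).foldl (fun sh k =>
          if pvLetter ((pvXor cts i j).getD k 0) then sh.modify i (fun row => row.modify k (· + 1)) else sh)
          sh) sh) (List.replicate cts.length (List.replicate (pvLen cts) 0))
def pvHitsA (cts : List (List Int)) (i k : Nat) : Int :=
  (((List.range cts.length).countP (fun j =>
    !(decide (i = j)) && decide (k < (pvXor cts i j).length)
      && pvLetter ((pvXor cts i j).getD k 0)) : Nat) : Int)

theorem pv_getD_range_addone (m : Nat) (Q : Nat → Bool) (r : List Int) (k : Nat) :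
    ((List.range m).foldl (fun r k' => if Q k' then r.modify k' (· + 1) else r) r).getD k 0
      = r.getD k 0 + if decide (k < m) && decide (k < r.length) && Q k then 1 else 0 := by
  induction m with
  | zero => simp
  | succ m ih =>
    rw [List.range_succ, List.foldl_append]
    simp only [List.foldl_cons, List.foldl_nil]
    have hl : ((List.range m).foldl (fun r k' => if Q k' then r.modify k' (· + 1) else r) r).length
        = r.length := pv_length_foldl _ _ _ (by intro r x; split <;> simp)
    by_cases hq : Q m
    · rw [if_pos hq, pv_getD_modify, hl, ih]
      by_cases hmk : m = k
      · subst hmk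
        have h1 : ¬ (m < m) := by omega
        have h2 : m < m + 1 := by omega
        by_cases hk : m < r.length <;> simp [h2, hk, hq]
      · have h3 : (k < m + 1) = (k < m) := by
          apply propext; constructor <;> intro h <;> omega
        simp [hmk, h3]
    · rw [if_neg hq, ih]
      by_cases hmk : m = k
      · subst hmk; simp [hq]
      · have h3 : (k < m + 1) = (k < m) := by
          apply propext; constructor <;> intro h <;> omega
        simp [h3]

theorem pv_getD_foldl_count {β : Type} (l : List β) (r : List Int) (k L : Nat)
    (step : List Int → β → List Int) (C : β → Bool)
    (hlen : ∀ r b, (step r b).length = r.length)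
    (heff : ∀ (r : List Int) b, r.length = L → (step r b).getD k 0 = r.getD k 0 + (if C b then 1 else 0))
    (hr : r.length = L) :
    (l.foldl step r).getD k 0 = r.getD k 0 + (l.countP C : Int) := by
  induction l generalizing r with
  | nil => simp
  | cons b l ih =>
    rw [List.foldl_cons, ih (step r b) (by rw [hlen, hr]), heff r b hr, List.countP_cons]
    push_cast
    by_cases hc : C b <;> simp [hc]
    ring

theorem pv_rowstep_len (cts : List (List Int)) (i j : Nat) (r : List Int) :
    (pvRowStep cts i j r).length = r.length := by
  unfold pvRowStep
  split
  · rfl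
  · exact pv_length_foldl _ _ _ (by intro r x; split <;> simp)

theorem pv_rowstep_getD (cts : List (List Int)) (i j : Nat) (r : List Int) (k L : Nat)
    (hk : k < L) (hr : r.length = L) :
    (pvRowStep cts i j r).getD k 0 = r.getD k 0 +
      (if (!(decide (i = j)) && decide (k < (pvXor cts i j).length)
            && pvLetter ((pvXor cts i j).getD k 0)) then 1 else 0) := by
  unfold pvRowStep
  by_cases hij : i = j
  · simp [hij]
  · rw [if_neg hij, pv_getD_range_addone, hr]
    simp [hij, hk]

theorem pv_row_len (cts : List (List Int)) (i : Nat) : (pvRow cts i).length = pvLen cts := by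
  unfold pvRow
  rw [pv_length_foldl _ _ _ (fun r j => pv_rowstep_len cts i j r), List.length_replicate]

theorem pv_row_getD (cts : List (List Int)) (i k : Nat) (hk : k < pvLen cts) :
    (pvRow cts i).getD k 0 = pvHitsA cts i k := by
  unfold pvRow pvHitsA
  rw [pv_getD_foldl_count (List.range cts.length) _ k (pvLen cts) _
    (fun j => !(decide (i = j)) && decide (k < (pvXor cts i j).length)
      && pvLetter ((pvXor cts i j).getD k 0))
    (fun r j => pv_rowstep_len cts i j r)
    (fun r j hr => pv_rowstep_getD cts i j r k (pvLen cts) hk hr)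
    (List.length_replicate)]
  simp [hk]

theorem pv_sh_row (cts : List (List Int)) (i : Nat) (hi : i < cts.length) :
    (pvSh cts).getD i [] = pvRow cts i := by
  unfold pvSh
  have hj : ∀ i' : Nat, (fun (sh : List (List Int)) (j : Nat) =>
      if i' = j then sh
      else
        (List.range (pvXor cts i' j).length).foldl (fun sh k =>
          if pvLetter ((pvXor cts i' j).getD k 0) then sh.modify i' (fun row => row.modify k (· + 1)) else sh)
          sh)
      = (fun sh j => sh.modify i' (pvRowStep cts i' j)) := by
    intro i'; funext sh j
    by_cases h : i' = j
    · subst h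
      have hid : pvRowStep cts i' i' = fun r => r := by
        funext r; simp [pvRowStep]
      rw [if_pos rfl, hid, pv_modify_id]
    · rw [if_neg h]
      rw [show (fun (sh : List (List Int)) (k : Nat) =>
          if pvLetter ((pvXor cts i' j).getD k 0) then sh.modify i' (fun row => row.modify k (· + 1)) else sh)
          = (fun sh k => sh.modify i' (fun row => if pvLetter ((pvXor cts i' j).getD k 0) then row.modify k (· + 1) else row)) from by
        funext sh k
        by_cases hp : pvLetter ((pvXor cts i' j).getD k 0)
        · rw [if_pos hp]; simp only [hp, if_true]
        · rw [if_neg hp]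
          simp only [Bool.not_eq_true] at hp
          simp only [hp, Bool.false_eq_true, if_false, pv_modify_id]]
      rw [pv_foldl_modify_lift]
      have hrs : pvRowStep cts i' j = fun r =>
          (List.range (pvXor cts i' j).length).foldl
            (fun r k => if pvLetter ((pvXor cts i' j).getD k 0) then r.modify k (· + 1) else r) r := by
        funext r; simp [pvRowStep, h]
      rw [hrs]
  conv_lhs => rw [show (fun (sh : List (List Int)) (i' : Nat) =>
      (List.range cts.length).foldl (fun sh j =>
        if i' = j then sh
        else
          (List.range (pvXor cts i' j).length).foldl (fun sh k =>
            if pvLetter ((pvXor cts i' j).getD k 0) then sh.modify i' (fun row => row.modify k (· + 1)) else sh)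
            sh) sh)
      = (fun sh i' => sh.modify i' (fun r => (List.range cts.length).foldl (fun r j => pvRowStep cts i' j r) r)) from by
    funext sh i'
    rw [hj i', pv_foldl_modify_lift]]
  rw [pv_getD_foldl_range_modify]
  simp [hi, pvRow]

theorem pv_range_scalarP {α : Type} (n k : Nat) (Q : Nat → Prop) [DecidablePred Q] (y x0 : α) :
    (List.range n).foldl (fun x j => if j = k ∧ Q j then y else x) x0
      = if k < n ∧ Q k then y else x0 := by
  induction n with
  | zero => simp
  | succ n ih =>
    rw [List.range_succ, List.foldl_append]
    simp only [List.foldl_cons, List.foldl_nil, ih]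
    by_cases hnk : n = k
    · subst hnk
      by_cases hq : Q n
      · simp [hq]
      · simp [hq]
    · have h3 : (k < n + 1) = (k < n) := by
        apply propext; constructor <;> intro h <;> omega
      simp [hnk, h3]

theorem pv_countP_range_getD {α : Type} (l : List α) (d : α) (q : α → Bool) :
    List.countP (fun j => q (l.getD j d)) (List.range l.length) = List.countP q l := by
  conv_rhs => rw [← pv_range_map_getD l d]
  rw [List.countP_map]
  rfl

theorem pv_foldl_range_getD {α γ : Type} (l : List α) (d : α) (g : γ → α → γ) (a : γ) :
    (List.range l.length).foldl (fun x j => g x (l.getD j d)) a = l.foldl g a := by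
  conv_rhs => rw [← pv_range_map_getD l d]
  rw [List.foldl_map]

theorem pv_inner2 (row c : List Int) (key : List (Option Int)) (k : Nat) (hk : k < key.length) :
    (row.zipIdx.foldl (fun key cj =>
        if 7 ≤ cj.1 ∧ cj.2 < c.length then
          key.set cj.2 (some (PySem.Int.bxor (c.getD cj.2 0) 32))
        else key) key).getD k none
      = if k < row.length ∧ 7 ≤ row.getD k 0 ∧ k < c.length then
          some (PySem.Int.bxor (c.getD k 0) 32)
        else key.getD k none := by
  rw [pv_zipIdx_eq_map row 0, List.foldl_map]
  rw [pv_getD_foldl_update (List.range row.length) key none k key.length _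
    (fun j x => if j = k ∧ 7 ≤ row.getD j 0 ∧ j < c.length then
      some (PySem.Int.bxor (c.getD k 0) 32) else x)
    (by intro key' j; split <;> simp)
    (by
      intro key' j hl
      by_cases hc : 7 ≤ row.getD j 0 ∧ j < c.length
      · rw [if_pos (by exact hc), pv_getD_set]
        obtain ⟨hc1, hc2⟩ := hc
        by_cases hjk : j = k
        · subst hjk
          have hkl : j < key'.length := by rw [hl]; exact hk
          simp only [List.getD_eq_getElem?_getD] at hc1
          simp [hc1, hc2, hkl]
        · simp [hjk]
      · rw [if_neg (by exact hc)]
        simp only [hc, and_false, if_false]) rfl]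
  rw [pv_range_scalarP row.length k (fun j => 7 ≤ row.getD j 0 ∧ j < c.length)]

theorem pv_sh_len (cts : List (List Int)) : (pvSh cts).length = cts.length := by
  unfold pvSh
  rw [pv_length_foldl _ _ _ ?_, List.length_replicate]
  intro s i
  refine pv_length_foldl _ _ _ ?_
  intro s j
  split
  · rfl
  · exact pv_length_foldl _ _ _ (by intro s k; split <;> simp)

theorem pv_getD_zipWith (a b : List Int) (k : Nat) (h1 : k < a.length) (h2 : k < b.length) :
    (List.zipWith PySem.Int.bxor a b).getD k 0
      = PySem.Int.bxor (a.getD k 0) (b.getD k 0) := by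
  have hz : k < (List.zipWith PySem.Int.bxor a b).length := by
    rw [List.length_zipWith]; omega
  rw [List.getD_eq_getElem _ _ hz, List.getD_eq_getElem _ _ h1, List.getD_eq_getElem _ _ h2,
    List.getElem_zipWith]

theorem pv_hitsA_eq (cts : List (List Int)) (i k : Nat) (hi : i < cts.length)
    (hci : k < (cts.getD i []).length) :
    pvHitsA cts i k = pvHits cts k ((cts.getD i []).getD k 0) := by
  unfold pvHitsA pvHits
  congr 1
  have step1 : List.countP (fun j =>
      !(decide (i = j)) && decide (k < (pvXor cts i j).length)
        && pvLetter ((pvXor cts i j).getD k 0)) (List.range cts.length)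
    = List.countP (fun j => decide (k < (cts.getD j []).length)
        && pvLetter (PySem.Int.bxor ((cts.getD i []).getD k 0) ((cts.getD j []).getD k 0)))
        (List.range cts.length) := by
    apply List.countP_congr
    intro j _
    by_cases hij : i = j
    · subst hij
      simp [PySem.Int.bxor_self, show pvLetter 0 = false from by decide]
    · by_cases hcj : k < (cts.getD j []).length
      · have hmin : k < (pvXor cts i j).length := by
          unfold pvXor; rw [List.length_zipWith]; omega
        rw [show (pvXor cts i j).getD k 0
            = PySem.Int.bxor ((cts.getD i []).getD k 0) ((cts.getD j []).getD k 0) from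
          pv_getD_zipWith _ _ k hci hcj]
        by_cases hL : pvLetter (PySem.Int.bxor ((cts.getD i []).getD k 0) ((cts.getD j []).getD k 0)) <;>
          simp_all
      · have hmin : ¬ k < (pvXor cts i j).length := by
          unfold pvXor; rw [List.length_zipWith]; omega
        simp only [List.getD_eq_getElem?_getD] at hcj
        simp [hmin, hcj]
  rw [step1]
  rw [pv_countP_range_getD cts ([] : List Int) (fun c => decide (k < c.length)
        && pvLetter (PySem.Int.bxor ((cts.getD i []).getD k 0) (c.getD k 0)))]
  unfold pvCol
  rw [List.countP_map, List.countP_filter]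
  apply List.countP_congr
  intro c _
  by_cases h1 : k < c.length <;>
    by_cases h2 : pvLetter (PySem.Int.bxor ((cts.getD i []).getD k 0) (c.getD k 0)) <;>
      simp_all

theorem A_eq_spec (cts : List (List Int)) :
    recover_keystream cts = (List.range (pvLen cts)).map (pvBest cts) := by
  show ((pvSh cts).zipIdx.foldl (fun key rowi =>
      rowi.1.zipIdx.foldl (fun key cntj =>
        if 7 ≤ cntj.1 ∧ cntj.2 < (cts.getD rowi.2 []).length then
          key.set cntj.2 (some (PySem.Int.bxor ((cts.getD rowi.2 []).getD cntj.2 0) 32))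
        else key) key) (List.replicate (pvLen cts) none))
    = (List.range (pvLen cts)).map (pvBest cts)
  have hstep_len : ∀ (key : List (Option Int)) (rowi : List Int × Nat),
      (rowi.1.zipIdx.foldl (fun key cntj =>
        if 7 ≤ cntj.1 ∧ cntj.2 < (cts.getD rowi.2 []).length then
          key.set cntj.2 (some (PySem.Int.bxor ((cts.getD rowi.2 []).getD cntj.2 0) 32))
        else key) key).length = key.length := by
    intro key rowi
    exact pv_length_foldl _ _ _ (by intro key cntj; split <;> simp)
  have hlen : ((pvSh cts).zipIdx.foldl (fun key rowi =>
      rowi.1.zipIdx.foldl (fun key cntj =>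
        if 7 ≤ cntj.1 ∧ cntj.2 < (cts.getD rowi.2 []).length then
          key.set cntj.2 (some (PySem.Int.bxor ((cts.getD rowi.2 []).getD cntj.2 0) 32))
        else key) key) (List.replicate (pvLen cts) none)).length = pvLen cts := by
    rw [pv_length_foldl _ _ _ hstep_len, List.length_replicate]
  apply List.ext_getElem (by rw [hlen]; simp)
  intro k hk1 hk2
  have hkL : k < pvLen cts := by rw [hlen] at hk1; exact hk1
  rw [List.getElem_map, List.getElem_range, ← List.getD_eq_getElem _ none hk1]
  rw [pv_getD_foldl_update ((pvSh cts).zipIdx) (List.replicate (pvLen cts) none) none k (pvLen cts) _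
    (fun rowi x => if k < rowi.1.length ∧ 7 ≤ rowi.1.getD k 0 ∧ k < (cts.getD rowi.2 []).length then
      some (PySem.Int.bxor ((cts.getD rowi.2 []).getD k 0) 32) else x)
    hstep_len
    (by
      intro key rowi hl
      exact pv_inner2 rowi.1 (cts.getD rowi.2 []) key k (by rw [hl]; exact hkL))
    (List.length_replicate)]
  rw [pv_zipIdx_eq_map (pvSh cts) [], List.foldl_map, pv_sh_len cts]
  rw [PySem.List.foldl_congr_mem (List.range cts.length) _
    (fun x i => if k < (cts.getD i []).length then
      (if 7 ≤ pvHits cts k ((cts.getD i []).getD k 0) then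
        some (PySem.Int.bxor ((cts.getD i []).getD k 0) 32) else x) else x) _
    (by
      intro x i hi
      rw [List.mem_range] at hi
      rw [pv_sh_row cts i hi]
      have hrl : k < (pvRow cts i).length := by rw [pv_row_len]; exact hkL
      by_cases hci : k < (cts.getD i []).length
      · rw [pv_row_getD cts i k hkL, pv_hitsA_eq cts i k hi hci]
        simp only [List.getD_eq_getElem?_getD] at hci ⊢
        by_cases hh : 7 ≤ pvHits cts k ((cts[i]?.getD [])[k]?.getD 0) <;>
          simp [hh, hci, hrl]
      · simp only [List.getD_eq_getElem?_getD] at hci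
        simp [hci])]
  rw [List.getD_replicate]
  conv_rhs => rw [pvBest]
  rw [show (pvCol cts k).foldl (fun best b =>
      if 7 ≤ pvHits cts k b then some (PySem.Int.bxor b 32) else best) none
    = cts.foldl (fun best c => if decide (k < c.length) then
        (if 7 ≤ pvHits cts k (c.getD k 0) then some (PySem.Int.bxor (c.getD k 0) 32) else best)
      else best) none from by
    rw [pv_foldl_filter_map cts (fun c => decide (k < c.length)) (fun c => c.getD k 0)
      (fun best b => if 7 ≤ pvHits cts k b then some (PySem.Int.bxor b 32) else best) none]
    rfl]
  rw [← pv_foldl_range_getD cts ([] : List Int) (fun best c => if decide (k < c.length) then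
      (if 7 ≤ pvHits cts k (c.getD k 0) then some (PySem.Int.bxor (c.getD k 0) 32) else best)
    else best) none]
  refine PySem.List.foldl_congr_mem _ _ _ _ ?_
  intro x i _
  by_cases hci : k < (cts.getD i []).length
  · simp [hci]
  · simp only [List.getD_eq_getElem?_getD] at hci
    simp [hci]
  exact hkL

theorem sum_ite_count (xs : List Int) (P : Int → Bool) (u : List Int)
    (hu : u.Nodup) (hsub : ∀ v ∈ xs, v ∈ u) :
    (u.map (fun v => if P v then (xs.count v : Int) else 0)).sum = (xs.countP P : Int) := by
  induction xs with
  | nil => simp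
  | cons x xs ih =>
    have hx : x ∈ u := hsub x (by simp)
    have step : ∀ v : Int, (if P v then ((x :: xs).count v : Int) else 0) =
        (if P v then (xs.count v : Int) else 0) + (if v = x then (if P x then (1:Int) else 0) else 0) := by
      intro v
      by_cases hvx : v = x
      · subst hvx; by_cases hp : P v <;> simp [hp]
      · have : (x == v) = false := by simp [BEq.beq]; omega
        by_cases hp : P v <;> simp [hp, hvx, List.count_cons, this]
    calc (u.map (fun v => if P v then ((x :: xs).count v : Int) else 0)).sum
        = (u.map (fun v => (if P v then (xs.count v : Int) else 0) +
            (if v = x then (if P x then (1:Int) else 0) else 0))).sum := by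
          congr 1; exact List.map_congr_left (fun v _ => step v)
      _ = (xs.countP P : Int) + (if P x then (1:Int) else 0) := by
          rw [PySem.List.sum_map_add_int, ih (fun v hv => hsub v (by simp [hv]))]
          congr 1
          by_cases hp : P x
          · simp only [hp, if_true]
            rw [show (fun v : Int => if v = x then (1:Int) else 0)
                = (fun v : Int => if (v == x) = true then (1:Int) else 0) from by
              funext v; simp]
            rw [PySem.List.sum_map_ite_one_zero (fun v => v == x) u]
            have h2 : u.countP (fun v => v == x) = u.count x := by
              rw [List.count_eq_countP]
            rw [h2, List.count_eq_one_of_mem hu hx]; simp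
          · simp [hp]
      _ = ((x :: xs).countP P : Int) := by rw [List.countP_cons]; by_cases hp : P x <;> simp [hp]

theorem hits_fold_eq (col : List Int) (b : Int) :
    ((col.foldl (fun d v => d.insert v (d.getD v 0 + 1)) (PySem.Dict.empty : PySem.Dict Int Int)).items.foldl
      (fun s vm => if pvLetter (PySem.Int.bxor b vm.1) then s + vm.2 else s) (0 : Int))
    = (col.countP (fun v => pvLetter (PySem.Int.bxor b v)) : Int) := by
  rw [PySem.Dict.foldl_insert_getD_add_one_eq_counter, PySem.Dict.items_counter, List.foldl_map]
  have := sum_ite_count col (fun v => pvLetter (PySem.Int.bxor b v)) (PySem.Set.ofList col)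
    (PySem.Set.nodup_ofList col) (fun v hv => (PySem.Set.mem_ofList col v).2 hv)
  rw [← this]
  rw [show (fun (s : Int) (v : Int) => if pvLetter (PySem.Int.bxor b v) then s + (col.count v : Int) else s)
      = (fun s v => s + (if pvLetter (PySem.Int.bxor b v) then (col.count v : Int) else 0)) from by
    funext s v; by_cases h : pvLetter (PySem.Int.bxor b v) <;> simp [h]]
  rw [PySem.List.foldl_add]
  simp

theorem B_eq_spec (cts : List (List Int)) :
    recover_keystream_alt cts = (List.range (pvLen cts)).map (pvBest cts) := by
  unfold recover_keystream_alt
  conv_rhs => rw [← List.nil_append (List.map (pvBest cts) (List.range (pvLen cts))),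
    ← PySem.List.foldl_append_singleton_eq_map]
  refine PySem.List.foldl_congr_mem _ _ _ _ ?_
  intro acc k _
  refine congrArg (fun z => acc ++ [z]) ?_
  show List.foldl _ none (pvCol cts k) = _
  unfold pvBest
  refine PySem.List.foldl_congr_mem _ _ _ _ ?_
  intro best b _
  show (if 7 ≤ List.foldl _ (0:Int) (List.foldl _ PySem.Dict.empty (pvCol cts k)).items then _ else _) = _
  rw [hits_fold_eq]
  rfl

-- ===== VERDICT (by name: the statement is the Claim_ definition above) =====
theorem recover_keystream_spec : Claim_equal_recover_keystream := by
  intro cts _ _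
  unfold Spec_recover_keystream
  rw [A_eq_spec, B_eq_spec]
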